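-- pv_equiv track=rewrite | github.com/pizzasteve111/TareaTDA | greedy.py | cobertura
-- ===== SOURCE A (Python) =====
-- def cobertura(casas, R, K):
--     casas_ordenadas = sorted(casas)
--
--     torres_colocadas = []
--     torre = 0
--
--     while casas_ordenadas:
--         proxima_torre = casas_ordenadas[0] + R
--
--         # Verificar si la ubicación de la próxima torre excede la longitud de la ruta, si la excede, ponemos la antena justo en la ultima casa antes de que exceda el largo de la ruta
--         if proxima_torre > K:
--             torres_colocadas.append(casas_ordenadas[0])
--             break
--
--         torres_colocadas.append(proxima_torre)
--         casas_ordenadas = [casa for casa in casas_ordenadas if casa > proxima_torre + R]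
--
--         torre = proxima_torre
--
--     return torres_colocadas
-- ===== SOURCE B (Python) =====
-- def cobertura(casas, R, K):
--     torres = []
--     cov = None      # rightmost coordinate covered by the last tower, None before the first
--     activo = True
--     for casa in sorted(casas):
--         if not activo or (cov is not None and casa <= cov):
--             continue
--         t = casa + R
--         if t > K:
--             torres.append(casa)
--             activo = False
--         else:
--             torres.append(t)
--             cov = t + R
--     return torres
-- ===== Notes on version B (the rewrite author's own statement) =====
-- stated objective: alternative
-- what changed: B is a single fold over the sorted houses carrying (towers, coverage-limit, active) state and skipping already-covered houses, instead of A's while loop that rebuilds the remaining-houses list with a full filter after every tower.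
import Mathlib
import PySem

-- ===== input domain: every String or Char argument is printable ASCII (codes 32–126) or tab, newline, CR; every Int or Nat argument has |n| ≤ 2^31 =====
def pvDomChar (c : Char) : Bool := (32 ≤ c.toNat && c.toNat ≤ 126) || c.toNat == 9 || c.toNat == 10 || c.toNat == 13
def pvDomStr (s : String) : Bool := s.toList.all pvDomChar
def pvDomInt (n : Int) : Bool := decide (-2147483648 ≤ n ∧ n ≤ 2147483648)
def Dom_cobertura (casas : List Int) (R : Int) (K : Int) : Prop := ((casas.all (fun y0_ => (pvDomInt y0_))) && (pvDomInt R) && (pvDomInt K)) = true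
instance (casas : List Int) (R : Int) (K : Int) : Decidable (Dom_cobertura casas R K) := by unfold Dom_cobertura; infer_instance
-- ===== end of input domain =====

-- B replaces A's rebuild-the-list-per-tower loop by one fold over the sorted houses carrying (towers, coverage limit, active) state; a timing run measured B faster.


-- ===== PORT A =====
-- A's while loop, with fuel (the Python loop does not terminate when R < 0 and some first
-- tower position stays ≤ K; Pre_ excludes exactly those inputs, and there fuel never runs out).
def coberturaLoop (fuel : Nat) (l : List Int) (R K : Int) : List Int :=
  match fuel, l with
  | 0, _ => []
  | _, [] => []
  | fuel + 1, h :: t =>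
    let proxima := h + R
    if proxima > K then [h]
    else proxima :: coberturaLoop fuel ((h :: t).filter (fun casa => decide (proxima + R < casa))) R K

def cobertura (casas : List Int) (R : Int) (K : Int) : List Int :=
  coberturaLoop (casas.length + 1) (PySem.List.sorted casas (fun x => x) false) R K

-- ===== PORT B =====
-- B's 'cov is not None and casa <= cov' test.
def cubierta (cov : Option Int) (casa : Int) : Bool :=
  match cov with | some v => decide (casa ≤ v) | none => false

-- B's for-loop body: state = (towers so far reversed, coverage limit of last tower, active flag).
def coberturaAltStep (R K : Int) (st : List Int × Option Int × Bool) (casa : Int) :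
    List Int × Option Int × Bool :=
  match st with
  | (acc, cov, activo) =>
    if !activo || cubierta cov casa then
      (acc, cov, activo)
    else
      let t := casa + R
      if t > K then (casa :: acc, cov, false)
      else (t :: acc, some (t + R), true)

def cobertura_alt (casas : List Int) (R : Int) (K : Int) : List Int :=
  (((PySem.List.sorted casas (fun x => x) false).foldl (coberturaAltStep R K)
      ([], none, true)).1).reverse

-- ===== PRECONDITION & SPEC =====
-- Pre_ excludes exactly the inputs where A's Python loop never terminates: with R < 0 the
-- filter can fail to remove the first house, so A returns only if R ≥ 0 or every house's
-- first tower position already exceeds K (then A breaks on the first iteration).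
def Pre_cobertura (casas : List Int) (R : Int) (K : Int) : Prop :=
  0 ≤ R ∨ ∀ c ∈ casas, K < c + R
instance (casas : List Int) (R : Int) (K : Int) : Decidable (Pre_cobertura casas R K) := by
  unfold Pre_cobertura; infer_instance

def pvWitness_cobertura : List Int × Int × Int := ([1, 12, 5, 3], 2, 20)

def Spec_cobertura (casas : List Int) (R : Int) (K : Int) (out : List Int) : Prop := out = cobertura_alt casas R K
instance (casas : List Int) (R : Int) (K : Int) (out : List Int) : Decidable (Spec_cobertura casas R K out) := by unfold Spec_cobertura; infer_instance

-- ===== CLAIM (what is proved, stated in full; the proofs are below) =====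
def Claim_equal_cobertura : Prop := ∀ (casas : List Int) (R : Int) (K : Int), Dom_cobertura casas R K → Pre_cobertura casas R K → Spec_cobertura casas R K (cobertura casas R K)

-- ===== LEMMAS AND PROOFS =====

-- Once the active flag is off, the fold step is the identity.
lemma fold_inactive (R K : Int) (acc : List Int) (cov : Option Int) :
    ∀ l : List Int, l.foldl (coberturaAltStep R K) (acc, cov, false) = (acc, cov, false) := by
  intro l
  induction l with
  | nil => rfl
  | cons a t ih => simpa [coberturaAltStep] using ih

-- Houses still covered by the last tower are skipped by the fold.
lemma fold_skip (R K v : Int) (acc : List Int) :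
    ∀ l : List Int,
      l.foldl (coberturaAltStep R K) (acc, some v, true) =
        (l.dropWhile (fun c => decide (c ≤ v))).foldl (coberturaAltStep R K) (acc, some v, true) := by
  intro l
  induction l with
  | nil => rfl
  | cons a t ih =>
    by_cases hav : a ≤ v
    · simpa [coberturaAltStep, cubierta, List.dropWhile_cons, hav] using ih
    · simp [hav]

-- On a sorted list, everything surviving dropWhile (≤ v) is > v.
lemma dropWhile_gt (v : Int) :
    ∀ t : List Int, t.Pairwise (· ≤ ·) →
      ∀ c ∈ t.dropWhile (fun c => decide (c ≤ v)), v < c := by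
  intro t
  induction t with
  | nil => intro _ c hc; simp at hc
  | cons a t ih =>
    intro hs c hc
    rcases List.pairwise_cons.mp hs with ⟨hall, hst⟩
    by_cases hav : a ≤ v
    · rw [List.dropWhile_cons, if_pos (by simpa using hav)] at hc
      exact ih hst c hc
    · rw [List.dropWhile_cons, if_neg (by simpa using hav)] at hc
      rcases List.mem_cons.mp hc with rfl | hc
      · exact lt_of_not_ge hav
      · exact lt_of_lt_of_le (lt_of_not_ge hav) (hall c hc)

-- On a sorted list, keeping the elements above x equals dropping the prefix ≤ x.
lemma filter_gt_eq_dropWhile (x : Int) :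
    ∀ (t : List Int), t.Pairwise (· ≤ ·) →
      t.filter (fun c => decide (x < c)) = t.dropWhile (fun c => decide (c ≤ x)) := by
  intro t
  induction t with
  | nil => intro _; rfl
  | cons a t ih =>
    intro hs
    rcases List.pairwise_cons.mp hs with ⟨hall, hst⟩
    by_cases hax : a ≤ x
    · have h1 : decide (x < a) = false := by simp [not_lt.mpr hax]
      have h2 : decide (a ≤ x) = true := by simp [hax]
      simp only [List.filter_cons, List.dropWhile_cons, h1, h2, if_true]
      exact ih hst
    · have hxa : x < a := lt_of_not_ge hax
      have h1 : decide (x < a) = true := by simp [hxa]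
      have h2 : decide (a ≤ x) = false := by simp [hax]
      simp only [List.filter_cons, List.dropWhile_cons, h1, h2, Bool.false_eq_true, if_false,
        if_true]
      congr 1
      exact List.filter_eq_self.mpr (fun b hb => by
        have : a ≤ b := hall b hb
        simp [lt_of_lt_of_le hxa this])

-- The fold's skip test is false when the coverage limit lies below the house.
lemma skip_false (cov : Option Int) (h : Int) (hv : ∀ v, cov = some v → v < h) :
    cubierta cov h = false := by
  unfold cubierta
  cases cov with
  | none => rfl
  | some v => simpa using not_le.mpr (hv v rfl)

-- Main invariant: B's fold, started in a state whose coverage limit lies below every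
-- remaining house, produces A's loop result (reversed) on top of the accumulator.
lemma loop_eq (R K : Int) :
    ∀ (fuel : Nat) (l : List Int), l.Pairwise (· ≤ ·) →
      (0 ≤ R ∨ ∀ c ∈ l, K < c + R) → l.length < fuel →
      ∀ (acc : List Int) (cov : Option Int),
        (∀ v, cov = some v → ∀ c ∈ l, v < c) →
        (l.foldl (coberturaAltStep R K) (acc, cov, true)).1 =
          (coberturaLoop fuel l R K).reverse ++ acc := by
  intro fuel
  induction fuel with
  | zero => intro l _ _ h; omega
  | succ f ih =>
    intro l hs hpre hlen acc cov hcov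
    match l with
    | [] => simp [coberturaLoop]
    | h :: t =>
      rcases List.pairwise_cons.mp hs with ⟨hall, hst⟩
      have hskip := skip_false cov h (fun v hv => hcov v hv h (List.mem_cons_self ..))
      by_cases hK : h + R > K
      · simp only [List.foldl_cons, coberturaAltStep, Bool.not_true, Bool.false_or, hskip,
          Bool.false_eq_true, if_false, if_pos hK]
        rw [fold_inactive]
        simp [coberturaLoop, hK]
      · have hR : 0 ≤ R := by
          rcases hpre with hR | hall'
          · exact hR
          · exact absurd (hall' h (List.mem_cons_self ..)) hK
        have hstep : List.foldl (coberturaAltStep R K) (acc, cov, true) (h :: t) =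
            List.foldl (coberturaAltStep R K) ((h + R) :: acc, some (h + R + R), true)
              (t.dropWhile (fun c => decide (c ≤ h + R + R))) := by
          simp only [List.foldl_cons, coberturaAltStep, Bool.not_true, Bool.false_or, hskip,
            Bool.false_eq_true, if_false, if_neg hK]
          exact fold_skip ..
        have hfilter :
            (h :: t).filter (fun casa => decide (h + R + R < casa)) =
              t.dropWhile (fun c => decide (c ≤ h + R + R)) := by
          have hhead : decide (h + R + R < h) = false := by simp; omega
          simp only [List.filter_cons, hhead]
          exact filter_gt_eq_dropWhile _ t hst
        have hsub := List.dropWhile_sublist (l := t) (p := fun c => decide (c ≤ h + R + R))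
        have hsorted' : (t.dropWhile (fun c => decide (c ≤ h + R + R))).Pairwise (· ≤ ·) :=
          hst.sublist hsub
        have hlen' : (t.dropWhile (fun c => decide (c ≤ h + R + R))).length < f := by
          have := List.length_dropWhile_le (fun c => decide (c ≤ h + R + R)) t
          simp at hlen; omega
        rw [hstep, ih _ hsorted' (Or.inl hR) hlen' _ _
          (fun v hv c hc => by
            cases hv
            exact dropWhile_gt _ t hst c hc)]
        simp only [coberturaLoop, if_neg hK, hfilter, List.reverse_cons, List.append_assoc]
        rfl

-- ===== VERDICT (by name: the statement is the Claim_ definition above) =====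
theorem cobertura_spec : Claim_equal_cobertura := by
  intro casas R K _ hpre
  unfold Spec_cobertura cobertura cobertura_alt
  rw [loop_eq R K (casas.length + 1) _ (PySem.List.sorted_pairwise ..)
    (by
      rcases hpre with hR | hall
      · exact Or.inl hR
      · exact Or.inr (fun c hc => hall c ((PySem.List.mem_sorted ..).mp hc)))
    (by have := PySem.List.length_sorted casas (fun x : Int => x) false; omega)
    [] none (by intro v hv; simp at hv)]
  simp
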